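-- pv_equiv track=rewrite | github.com/CiranoB/translate-words | playground.py | translate_case_first_letter_isn_t_vowel
-- ===== SOURCE A (Python) =====
-- vowel_list = ['a', 'e', 'i', 'o', 'u', 'y']
--
-- def translate_case_first_letter_isn_t_vowel(input: str) -> str:
--     for str in input:
--         if str not in vowel_list:
--             input = input[1:] + input[0]
--         else:
--             break
--     result = input + "ay"
--     return result
-- ===== SOURCE B (Python) =====
-- vowel_list = ['a', 'e', 'i', 'o', 'u', 'y']
--
-- def translate_case_first_letter_isn_t_vowel(input: str) -> str:
--     k = min((input.index(v) for v in vowel_list if v in input), default=len(input))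
--     return input[k:] + input[:k] + "ay"
-- ===== Notes on version B (the rewrite author's own statement) =====
-- stated objective: idiomatic
-- what changed: Instead of repeatedly rotating the string one character at a time inside a loop over its characters, B computes the first-vowel index directly as the minimum of input.index(v) over the vowel list and rotates once with two slices.
import Mathlib
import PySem

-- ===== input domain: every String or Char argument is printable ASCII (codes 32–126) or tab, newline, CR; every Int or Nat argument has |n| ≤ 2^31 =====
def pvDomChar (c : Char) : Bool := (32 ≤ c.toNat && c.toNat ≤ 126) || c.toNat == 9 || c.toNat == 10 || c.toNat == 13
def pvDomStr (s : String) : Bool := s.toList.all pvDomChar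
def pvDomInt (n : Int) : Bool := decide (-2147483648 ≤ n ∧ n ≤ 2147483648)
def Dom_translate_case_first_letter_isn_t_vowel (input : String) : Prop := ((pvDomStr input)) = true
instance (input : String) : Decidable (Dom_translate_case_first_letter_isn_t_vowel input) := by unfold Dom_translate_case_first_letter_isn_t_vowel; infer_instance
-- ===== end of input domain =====

-- B replaces A's character-by-character rotation loop by a direct computation of the
-- first-vowel index (min of input.index(v) over the vowel list) and one two-slice rotation
-- (idiomatic; same return value).

-- ===== PORT A =====
def pvVowelList : List Char := ['a', 'e', 'i', 'o', 'u', 'y']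

-- the for-loop of A: iterates over the ORIGINAL characters (scan), carrying the rotated string (cur);
-- `input = input[1:] + input[0]` becomes `t ++ [h]` (cur is never empty when the loop body runs)
def pvLoopA : List Char → List Char → List Char
  | [], cur => cur
  | c :: rest, cur =>
      if c ∉ pvVowelList then
        pvLoopA rest (match cur with | [] => [] | h :: t => t ++ [h])
      else cur

def translate_case_first_letter_isn_t_vowel (input : String) : String :=
  String.ofList (pvLoopA input.toList input.toList ++ ['a', 'y'])

-- ===== PORT B =====
def translate_case_first_letter_isn_t_vowel_alt (input : String) : String :=
  let cs := input.toList
  let k := ((pvVowelList.filterMap (fun v => PySem.List.index? cs v)).min?).getD cs.length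
  String.ofList (cs.drop k ++ cs.take k ++ ['a', 'y'])

-- ===== PRECONDITION & SPEC =====
def Spec_translate_case_first_letter_isn_t_vowel (input : String) (out : String) : Prop := out = translate_case_first_letter_isn_t_vowel_alt input
instance (input : String) (out : String) : Decidable (Spec_translate_case_first_letter_isn_t_vowel input out) := by unfold Spec_translate_case_first_letter_isn_t_vowel; infer_instance

-- ===== CLAIM (what is proved, stated in full; the proofs are below) =====
def Claim_equal_translate_case_first_letter_isn_t_vowel : Prop := ∀ (input : String), Dom_translate_case_first_letter_isn_t_vowel input → Spec_translate_case_first_letter_isn_t_vowel input (translate_case_first_letter_isn_t_vowel input)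

-- ===== LEMMAS AND PROOFS =====

-- A's loop rotates by the index of the first vowel (or by the full length if none)
theorem pvLoopA_eq_rotate (scan : List Char) : ∀ (cur : List Char), cur ≠ [] →
    pvLoopA scan cur = cur.rotate (scan.findIdx (fun c => pvVowelList.contains c)) := by
  induction scan with
  | nil => intro cur _; simp [pvLoopA]
  | cons c rest ih =>
      intro cur hcur
      by_cases hv : c ∈ pvVowelList
      · simp [pvLoopA, hv, List.findIdx_cons]
      · obtain ⟨h, t, rfl⟩ : ∃ h t, cur = h :: t := by
          cases cur with
          | nil => exact absurd rfl hcur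
          | cons h t => exact ⟨h, t, rfl⟩
        have hc : pvVowelList.contains c = false := by
          simp [hv]
        have hrot : t ++ [h] = (h :: t).rotate 1 := by
          simp [List.rotate_cons_succ, List.rotate_zero]
        simp only [pvLoopA, hv, not_false_iff, if_pos trivial, List.findIdx_cons, hc,
          cond_false]
        rw [ih (t ++ [h]) (by simp), hrot, List.rotate_rotate]
        ring_nf

theorem min?_map_succ (l : List Nat) : (l.map (· + 1)).min? = l.min?.map (· + 1) := by
  induction l with
  | nil => rfl
  | cons a t ih =>
      rw [List.map_cons, List.min?_cons, List.min?_cons, ih]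
      cases h : t.min? with
      | none => rfl
      | some m => simp only [Option.map_some, Option.elim, Option.some.injEq]; omega

-- B's index computation equals findIdx over the scanned string
theorem min_index_eq_findIdx (cs : List Char) :
    ((pvVowelList.filterMap (fun v => PySem.List.index? cs v)).min?).getD cs.length
      = cs.findIdx (fun c => pvVowelList.contains c) := by
  induction cs with
  | nil =>
      rw [List.filterMap_eq_nil_iff.mpr
        (by intro v _; simp [PySem.List.index?_eq_idxOf?])]
      rfl
  | cons c t ih =>
      by_cases hv : c ∈ pvVowelList
      · have h0 : (0 : Nat) ∈ pvVowelList.filterMap (fun v => PySem.List.index? (c :: t) v) := by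
          refine List.mem_filterMap.mpr ⟨c, hv, ?_⟩
          exact PySem.List.index?_cons_self ..
        have hne := List.ne_nil_of_mem h0
        obtain ⟨m, hm⟩ : ∃ m, (pvVowelList.filterMap (fun v => PySem.List.index? (c :: t) v)).min? = some m := by
          cases hmin : (pvVowelList.filterMap (fun v => PySem.List.index? (c :: t) v)).min? with
          | none => exact absurd (List.min?_eq_none_iff.mp hmin) hne
          | some m => exact ⟨m, rfl⟩
        have hle := (List.min?_eq_some_iff.mp hm).2 0 h0
        have hm0 : m = 0 := Nat.le_zero.mp hle
        subst hm0
        simp only [hm, Option.getD_some, List.findIdx_cons,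
          List.contains_iff_mem.mpr hv, cond_true]
      · have hc : pvVowelList.contains c = false := by simp [hv]
        have hstep : pvVowelList.filterMap (fun v => PySem.List.index? (c :: t) v)
            = (pvVowelList.filterMap (fun v => PySem.List.index? t v)).map (· + 1) := by
          rw [List.map_filterMap]
          apply List.filterMap_congr
          intro v hvmem
          have hne : c ≠ v := fun h => hv (h ▸ hvmem)
          exact PySem.List.index?_cons_of_ne _ hne
        rw [hstep, min?_map_succ]
        simp only [List.findIdx_cons, hc, cond_false, List.length_cons]
        cases h : (pvVowelList.filterMap (fun v => PySem.List.index? t v)).min? with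
        | none => rw [h] at ih; simp at ih ⊢; omega
        | some m => rw [h] at ih; simp at ih ⊢; omega

-- ===== VERDICT (by name: the statement is the Claim_ definition above) =====
theorem translate_case_first_letter_isn_t_vowel_spec : Claim_equal_translate_case_first_letter_isn_t_vowel := by
  intro input _
  unfold Spec_translate_case_first_letter_isn_t_vowel
  unfold translate_case_first_letter_isn_t_vowel translate_case_first_letter_isn_t_vowel_alt
  simp only [min_index_eq_findIdx]
  cases hcs : input.toList with
  | nil => rfl
  | cons c t =>
      rw [pvLoopA_eq_rotate _ _ (by simp)]
      set j := (c :: t).findIdx (fun c => pvVowelList.contains c) with hj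
      have hjle : j ≤ (c :: t).length := List.findIdx_le_length
      rcases Nat.lt_or_ge j (c :: t).length with hlt | hge
      · rw [List.rotate_eq_drop_append_take (le_of_lt hlt)]
      · have hjeq : j = (c :: t).length := le_antisymm hjle hge
        rw [hjeq, List.rotate_length]
        simp
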